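-- pv_equiv track=rewrite | github.com/dejar212/aim-orcs | surname_correction.py | distance1_op
-- ===== SOURCE A (Python) =====
-- from typing import Iterable, Optional
--
-- def distance1_op(a: str, b: str) -> Optional[tuple[str, int]]:
--     """Return (op, pos) if distance <=1 else None.
--     op in {"equal","replace","insert","delete","transpose"}.
--     pos is index in the longer/first string depending on op; used only for insert.
--     """
--     if a == b:
--         return ("equal", -1)
--     if abs(len(a) - len(b)) > 1:
--         return None
--     la, lb = len(a), len(b)
--     # same length: replace or transpose
--     if la == lb:
--         mism = [i for i, (x, y) in enumerate(zip(a, b)) if x != y]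
--         if len(mism) == 1:
--             return ("replace", mism[0])
--         if len(mism) == 2 and mism[0] + 1 == mism[1] and a[mism[0]] == b[mism[1]] and a[mism[1]] == b[mism[0]]:
--             return ("transpose", mism[0])
--         return None
--     # insertion: b longer by 1 (a missing char)
--     if la + 1 == lb:
--         i = 0
--         while i < la and a[i] == b[i]:
--             i += 1
--         # insert position i (in b)
--         if a[i:] == b[i + 1 :]:
--             return ("insert", i)
--         return None
--     # deletion: a longer by 1
--     if la == lb + 1:
--         i = 0
--         while i < lb and a[i] == b[i]:
--             i += 1
--         if a[i + 1 :] == b[i:]: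
--             return ("delete", i)
--         return None
--     return None
-- ===== SOURCE B (Python) =====
-- def _common(u, v):
--     """Length of the common prefix of two sequences."""
--     n = 0
--     for x, y in zip(u, v):
--         if x != y:
--             break
--         n += 1
--     return n
--
--
-- def distance1_op(a: str, b: str):
--     """Classify from one common-prefix/suffix computation instead of per-case scans."""
--     if a == b:
--         return ("equal", -1)
--     la, lb = len(a), len(b)
--     if abs(la - lb) > 1:
--         return None
--     p = _common(a, b)
--     s = _common(a[p:][::-1], b[p:][::-1])
--     if la == lb:
--         k = la - p - s
--         if k == 1:
--             return ("replace", p)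
--         if k == 2 and a[p] == b[p + 1] and a[p + 1] == b[p]:
--             return ("transpose", p)
--         return None
--     if p + s >= min(la, lb):
--         return ("insert", p) if lb == la + 1 else ("delete", p)
--     return None
-- ===== Notes on version B (the rewrite author's own statement) =====
-- stated objective: idiomatic
-- what changed: Replaces A's per-case scans (a mismatch-index list comprehension for equal lengths and a separate index-by-index while-loop per insert/delete branch) by one common-prefix/common-suffix computation p,s done once over zipped sequences, from which the edit is classified arithmetically (window length la-p-s).
import Mathlib
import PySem

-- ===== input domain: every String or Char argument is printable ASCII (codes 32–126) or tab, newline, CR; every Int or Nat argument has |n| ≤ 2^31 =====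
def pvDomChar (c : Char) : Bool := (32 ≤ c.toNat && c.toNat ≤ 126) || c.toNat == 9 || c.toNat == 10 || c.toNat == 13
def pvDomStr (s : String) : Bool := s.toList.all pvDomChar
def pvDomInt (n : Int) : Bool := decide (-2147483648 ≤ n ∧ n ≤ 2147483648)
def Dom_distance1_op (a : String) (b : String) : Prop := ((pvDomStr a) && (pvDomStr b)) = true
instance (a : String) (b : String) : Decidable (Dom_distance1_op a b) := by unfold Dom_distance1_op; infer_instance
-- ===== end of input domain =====

-- B replaces A's per-case scans by one common-prefix/suffix computation and an arithmetic
-- classification (objective: idiomatic; same asymptotic cost).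

-- ===== PORT A =====
-- mism = [i for i, (x, y) in enumerate(zip(a, b)) if x != y]
def pvMism (xs ys : List Char) : List Int :=
  ((PySem.List.enumerate (xs.zip ys) 0).filter (fun q => q.2.1 != q.2.2)).map (fun q => q.1)

-- `i = 0; while i < bound and a[i] == b[i]: i += 1`, fuel-counted; indexing is in range
-- whenever `i < bound ≤ length`, so `getD` is exact there.
def pvWhileEq (xs ys : List Char) (bound : Nat) : Nat → Nat → Nat
  | 0, i => i
  | f + 1, i => if i < bound ∧ xs.getD i ' ' = ys.getD i ' ' then pvWhileEq xs ys bound f (i + 1) else i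

def distance1_op (a : String) (b : String) : Option (String × Int) :=
  if a == b then some ("equal", -1)
  else if ((a.toList.length : Int) - (b.toList.length : Int)).natAbs > 1 then none
  else
    let xs := a.toList
    let ys := b.toList
    let la := xs.length
    let lb := ys.length
    if la = lb then
      let mism := pvMism xs ys
      if mism.length = 1 then some ("replace", mism.getD 0 0)
      else if mism.length = 2 ∧ mism.getD 0 0 + 1 = mism.getD 1 0
          ∧ PySem.List.pyGet? xs (mism.getD 0 0) = PySem.List.pyGet? ys (mism.getD 1 0)
          ∧ PySem.List.pyGet? xs (mism.getD 1 0) = PySem.List.pyGet? ys (mism.getD 0 0)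
      then some ("transpose", mism.getD 0 0)
      else none
    else if la + 1 = lb then
      let i := pvWhileEq xs ys la (la + 1) 0
      if xs.drop i = ys.drop (i + 1) then some ("insert", (i : Int)) else none   -- a[i:] == b[i+1:]
    else if la = lb + 1 then
      let i := pvWhileEq xs ys lb (lb + 1) 0
      if xs.drop (i + 1) = ys.drop i then some ("delete", (i : Int)) else none   -- a[i+1:] == b[i:]
    else none

-- ===== PORT B =====
-- _common(u, v): `for x, y in zip(u, v): if x != y: break; n += 1`
def pvCommon : List Char → List Char → Nat
  | x :: u, y :: v => if x = y then pvCommon u v + 1 else 0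
  | _, _ => 0

def distance1_op_alt (a : String) (b : String) : Option (String × Int) :=
  if a == b then some ("equal", -1)
  else
    let xs := a.toList
    let ys := b.toList
    let la := xs.length
    let lb := ys.length
    if ((la : Int) - (lb : Int)).natAbs > 1 then none
    else
      let p := pvCommon xs ys
      -- s = _common(a[p:][::-1], b[p:][::-1])
      let s := pvCommon (xs.drop p).reverse (ys.drop p).reverse
      if la = lb then
        let k := la - p - s
        if k = 1 then some ("replace", (p : Int))
        else if k = 2 ∧ xs.getD p ' ' = ys.getD (p + 1) ' ' ∧ xs.getD (p + 1) ' ' = ys.getD p ' '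
        then some ("transpose", (p : Int))     -- indices are in range: k = 2 forces p + 1 < la
        else none
      else if min la lb ≤ p + s then
        if lb = la + 1 then some ("insert", (p : Int)) else some ("delete", (p : Int))
      else none

-- ===== PRECONDITION & SPEC =====
def Spec_distance1_op (a : String) (b : String) (out : Option (String × Int)) : Prop := out = distance1_op_alt a b
instance (a : String) (b : String) (out : Option (String × Int)) : Decidable (Spec_distance1_op a b out) := by unfold Spec_distance1_op; infer_instance

-- ===== CLAIM (what is proved, stated in full; the proofs are below) =====
def Claim_equal_distance1_op : Prop := ∀ (a : String) (b : String), Dom_distance1_op a b → Spec_distance1_op a b (distance1_op a b)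

-- ===== LEMMAS AND PROOFS =====

lemma pvCommon_le (u v : List Char) : pvCommon u v ≤ min u.length v.length := by
  induction u generalizing v with
  | nil => simp [pvCommon]
  | cons x u ih =>
    cases v with
    | nil => simp [pvCommon]
    | cons y v =>
      simp only [pvCommon]
      split
      · have := ih v; simp [List.length_cons]; omega
      · omega

lemma pvCommon_comm (u v : List Char) : pvCommon u v = pvCommon v u := by
  induction u generalizing v with
  | nil => cases v <;> simp [pvCommon]
  | cons x u ih =>
    cases v with
    | nil => simp [pvCommon]
    | cons y v =>
      simp only [pvCommon]
      by_cases h : x = y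
      · simp [h, ih v]
      · simp [h, Ne.symm h]

lemma pvCommon_getD (u v : List Char) (d : Char) (j : Nat) (h : j < pvCommon u v) :
    u.getD j d = v.getD j d := by
  induction u generalizing v j with
  | nil => simp [pvCommon] at h
  | cons x u ih =>
    cases v with
    | nil => simp [pvCommon] at h
    | cons y v =>
      simp only [pvCommon] at h
      split at h
      · cases j with
        | zero => simpa using ‹x = y›
        | succ j => simpa using ih v j (by omega)
      · omega

lemma pvCommon_take (u v : List Char) : u.take (pvCommon u v) = v.take (pvCommon u v) := by
  induction u generalizing v with
  | nil => cases v <;> simp [pvCommon]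
  | cons x u ih =>
    cases v with
    | nil => simp [pvCommon]
    | cons y v =>
      simp only [pvCommon]
      split
      · simp [List.take_succ_cons, ‹x = y›, ih v]
      · simp

lemma pvCommon_mismatch (u v : List Char) (d : Char)
    (h1 : pvCommon u v < u.length) (h2 : pvCommon u v < v.length) :
    u.getD (pvCommon u v) d ≠ v.getD (pvCommon u v) d := by
  induction u generalizing v with
  | nil => simp at h1
  | cons x u ih =>
    cases v with
    | nil => simp at h2
    | cons y v =>
      by_cases hxy : x = y
      · simp only [pvCommon, if_pos hxy, List.length_cons] at h1 h2 ⊢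
        simpa using ih v (by omega) (by omega)
      · simp only [pvCommon, if_neg hxy] at h1 h2 ⊢
        simpa using hxy

lemma pvCommon_ge_iff (u v : List Char) : u.length ≤ pvCommon u v ↔ u <+: v := by
  induction u generalizing v with
  | nil => simp
  | cons x u ih =>
    cases v with
    | nil =>
      simp only [pvCommon]
      constructor
      · intro h; simp at h
      · intro h; exact absurd h (by simp)
    | cons y v =>
      simp only [pvCommon, List.length_cons]
      by_cases hxy : x = y
      · rw [if_pos hxy]
        constructor
        · intro h; exact List.cons_prefix_cons.mpr ⟨hxy, (ih v).1 (by omega)⟩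
        · intro h; have := (ih v).2 (List.cons_prefix_cons.mp h).2; omega
      · rw [if_neg hxy]
        constructor
        · intro h; omega
        · intro h; exact absurd (List.cons_prefix_cons.mp h).1 hxy

lemma pvWhileEq_spec (xs ys : List Char) (c : Nat) (hc : c ≤ xs.length) (hc' : c ≤ ys.length) :
    ∀ f i, i ≤ min c (pvCommon xs ys) → min c (pvCommon xs ys) < i + f →
      pvWhileEq xs ys c f i = min c (pvCommon xs ys) := by
  intro f
  induction f with
  | zero => intro i h1 h2; omega
  | succ f ih =>
    intro i h1 h2
    by_cases hi : i = min c (pvCommon xs ys)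
    · subst hi
      rw [pvWhileEq, if_neg]
      rintro ⟨hlt, heq⟩
      -- here i = min c P < c, so i = P, and P < c ≤ lengths gives a mismatch at P
      have hP : pvCommon xs ys = min c (pvCommon xs ys) := by omega
      exact pvCommon_mismatch xs ys ' ' (by omega) (by omega) (by rw [hP]; exact heq)
    · rw [pvWhileEq, if_pos ⟨by omega, pvCommon_getD xs ys ' ' i (by omega)⟩]
      exact ih (i + 1) (by omega) (by omega)

lemma pvWhileEq_eq_common (xs ys : List Char) (c : Nat) (hc : c = min xs.length ys.length) :
    pvWhileEq xs ys c (c + 1) 0 = pvCommon xs ys := by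
  have h := pvCommon_le xs ys
  have hm : min c (pvCommon xs ys) = pvCommon xs ys := by omega
  rw [pvWhileEq_spec xs ys c (by omega) (by omega) (c + 1) 0 (by omega) (by omega), hm]

lemma pv_suffix_iff (r t : List Char) (_h : r.length ≤ t.length) :
    r.length ≤ pvCommon r.reverse t.reverse ↔ r = t.drop (t.length - r.length) := by
  rw [show r.length = r.reverse.length by simp, pvCommon_ge_iff, List.reverse_prefix,
    List.suffix_iff_eq_drop]
  simp

lemma pv_getD_drop_rev (xs : List Char) (p j : Nat) (hp : p ≤ j) (hj : j < xs.length) (d : Char) :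
    ((xs.drop p).reverse).getD (xs.length - 1 - j) d = xs.getD j d := by
  have hlen : (xs.drop p).reverse.length = xs.length - p := by simp
  rw [List.getD_eq_getElem _ d (by omega), List.getD_eq_getElem _ d hj]
  rw [List.getElem_reverse]
  rw [List.getElem_drop]
  congr 1
  simp only [List.length_drop]
  omega

lemma pvMism_mem (xs ys : List Char) (m : Int) :
    m ∈ pvMism xs ys ↔ ∃ j : Nat, j < xs.length ∧ j < ys.length ∧ m = (j : Int) ∧
      xs.getD j ' ' ≠ ys.getD j ' ' := by
  simp only [pvMism, List.mem_map, List.mem_filter, PySem.List.mem_enumerate_iff]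
  constructor
  · rintro ⟨q, ⟨⟨k, hk, rfl⟩, hne⟩, rfl⟩
    simp only [List.length_zip, lt_min_iff] at hk
    refine ⟨k, hk.1, hk.2, by simp, ?_⟩
    rw [List.getD_eq_getElem _ _ hk.1, List.getD_eq_getElem _ _ hk.2]
    simpa [List.getElem_zip, bne_iff_ne] using hne
  · rintro ⟨j, hj1, hj2, rfl, hne⟩
    refine ⟨((j : Int), (xs[j], ys[j])), ⟨⟨j, by simp [List.length_zip]; omega, by simp [List.getElem_zip]⟩, ?_⟩, rfl⟩
    rw [List.getD_eq_getElem _ _ hj1, List.getD_eq_getElem _ _ hj2] at hne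
    simpa [bne_iff_ne] using hne

lemma pvMism_pairwise (xs ys : List Char) : (pvMism xs ys).Pairwise (· < ·) := by
  unfold pvMism
  refine List.Pairwise.map _ ?_ (List.Pairwise.filter _ (PySem.List.pairwise_lt_enumerate _ _))
  intro p q h
  exact h

lemma pv_p_lt (xs ys : List Char) (hlen : xs.length = ys.length) (hne : xs ≠ ys) :
    pvCommon xs ys < xs.length := by
  have h := pvCommon_le xs ys
  by_contra hge
  have hp : pvCommon xs ys = xs.length := by omega
  apply hne
  have := pvCommon_take xs ys
  rw [hp, List.take_length] at this
  rw [this, List.take_of_length_le (by omega)]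

lemma pv_s_lt (xs ys : List Char) (hlen : xs.length = ys.length) (hne : xs ≠ ys) :
    pvCommon (xs.drop (pvCommon xs ys)).reverse (ys.drop (pvCommon xs ys)).reverse
      < xs.length - pvCommon xs ys := by
  set p := pvCommon xs ys with hp
  set s := pvCommon (xs.drop p).reverse (ys.drop p).reverse with hs
  have hple : p ≤ xs.length := le_trans (pvCommon_le xs ys) (by omega)
  have hle := pvCommon_le (xs.drop p).reverse (ys.drop p).reverse
  simp only [List.length_reverse, List.length_drop] at hle
  by_contra hge
  have hseq : s = xs.length - p := by omega
  have hpre : (xs.drop p).reverse <+: (ys.drop p).reverse := by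
    rw [← pvCommon_ge_iff]
    simp only [List.length_reverse, List.length_drop]
    omega
  have heq : (xs.drop p).reverse = (ys.drop p).reverse :=
    hpre.eq_of_length (by simp; omega)
  have hdrop : xs.drop p = ys.drop p := by
    have := congrArg List.reverse heq
    simpa using this
  apply hne
  have htake := pvCommon_take xs ys
  calc xs = xs.take p ++ xs.drop p := (List.take_append_drop p xs).symm
    _ = ys.take p ++ ys.drop p := by rw [show List.take p xs = List.take p ys from htake, hdrop]
    _ = ys := List.take_append_drop p ys

lemma pv_p_mem (xs ys : List Char) (hlen : xs.length = ys.length) (hne : xs ≠ ys) :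
    ((pvCommon xs ys : Nat) : Int) ∈ pvMism xs ys := by
  have hplt := pv_p_lt xs ys hlen hne
  exact (pvMism_mem xs ys _).mpr ⟨pvCommon xs ys, hplt, by omega, rfl,
    pvCommon_mismatch xs ys ' ' hplt (by omega)⟩

lemma pv_last_mem (xs ys : List Char) (hlen : xs.length = ys.length) (hne : xs ≠ ys) :
    ((xs.length - 1 - pvCommon (xs.drop (pvCommon xs ys)).reverse (ys.drop (pvCommon xs ys)).reverse : Nat) : Int)
      ∈ pvMism xs ys := by
  have hplt := pv_p_lt xs ys hlen hne
  have hslt := pv_s_lt xs ys hlen hne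
  set p := pvCommon xs ys with hp
  set s := pvCommon (xs.drop p).reverse (ys.drop p).reverse with hs
  set q := xs.length - 1 - s with hq
  have hpq : p ≤ q := by omega
  have hqlt : q < xs.length := by omega
  have hmis := pvCommon_mismatch (xs.drop p).reverse (ys.drop p).reverse ' '
    (by simp only [List.length_reverse, List.length_drop]; omega)
    (by simp only [List.length_reverse, List.length_drop]; omega)
  rw [← hs] at hmis
  have hsx : xs.length - 1 - q = s := by omega
  have h1 : ((xs.drop p).reverse).getD (xs.length - 1 - q) ' ' = xs.getD q ' ' :=
    pv_getD_drop_rev xs p q hpq hqlt ' '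
  have h2 : ((ys.drop p).reverse).getD (ys.length - 1 - q) ' ' = ys.getD q ' ' :=
    pv_getD_drop_rev ys p q hpq (by omega) ' '
  rw [hsx] at h1
  rw [show ys.length - 1 - q = s by omega] at h2
  exact (pvMism_mem xs ys _).mpr ⟨q, hqlt, by omega, rfl, by rw [← h1, ← h2]; exact hmis⟩

lemma pv_bounds (xs ys : List Char) (hlen : xs.length = ys.length) :
    ∀ m ∈ pvMism xs ys, ((pvCommon xs ys : Nat) : Int) ≤ m ∧
      m ≤ ((xs.length - 1 - pvCommon (xs.drop (pvCommon xs ys)).reverse (ys.drop (pvCommon xs ys)).reverse : Nat) : Int) := by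
  intro m hm
  obtain ⟨j, hj1, hj2, rfl, hne'⟩ := (pvMism_mem xs ys m).mp hm
  set p := pvCommon xs ys with hp
  set s := pvCommon (xs.drop p).reverse (ys.drop p).reverse with hs
  have hjp : p ≤ j := by
    by_contra hlt
    exact hne' (pvCommon_getD xs ys ' ' j (by omega))
  constructor
  · exact_mod_cast hjp
  · have hjq : j ≤ xs.length - 1 - s := by
      by_contra hgt
      have hrev : xs.length - 1 - j < s := by omega
      have := pvCommon_getD (xs.drop p).reverse (ys.drop p).reverse ' ' (xs.length - 1 - j)
        (by rw [← hs]; omega)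
      rw [pv_getD_drop_rev xs p j hjp hj1 ' ',
        show xs.length - 1 - j = ys.length - 1 - j by omega,
        pv_getD_drop_rev ys p j hjp hj2 ' '] at this
      exact hne' this
    exact_mod_cast hjq

lemma pv_mism_one (xs ys : List Char) (hlen : xs.length = ys.length) (hne : xs ≠ ys) :
    (pvMism xs ys).length = 1 ↔
      xs.length - pvCommon xs ys -
        pvCommon (xs.drop (pvCommon xs ys)).reverse (ys.drop (pvCommon xs ys)).reverse = 1 := by
  have hplt := pv_p_lt xs ys hlen hne
  have hslt := pv_s_lt xs ys hlen hne
  have hpm := pv_p_mem xs ys hlen hne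
  have hqm := pv_last_mem xs ys hlen hne
  have hbd := pv_bounds xs ys hlen
  set p := pvCommon xs ys with hp
  set s := pvCommon (xs.drop p).reverse (ys.drop p).reverse with hs
  constructor
  · intro hl
    obtain ⟨m, hm⟩ := List.length_eq_one_iff.mp hl
    rw [hm] at hpm hqm
    simp only [List.mem_singleton] at hpm hqm
    have : ((p : Nat) : Int) = ((xs.length - 1 - s : Nat) : Int) := hpm.trans hqm.symm
    have : p = xs.length - 1 - s := by exact_mod_cast this
    omega
  · intro hk
    have hq : xs.length - 1 - s = p := by omega
    rw [hq] at hqm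
    have hall : ∀ m ∈ pvMism xs ys, m = ((p : Nat) : Int) := by
      intro m hm
      have := hbd m hm
      rw [hq] at this
      omega
    have hpw := pvMism_pairwise xs ys
    match hmeq : pvMism xs ys with
    | [] => rw [hmeq] at hpm; simp at hpm
    | [m] => rfl
    | m1 :: m2 :: tl =>
      rw [hmeq] at hall hpw
      have h1 := hall m1 (by simp)
      have h2 := hall m2 (by simp)
      rw [List.pairwise_cons] at hpw
      have := hpw.1 m2 (by simp)
      omega

lemma pv_mism_one_eq (xs ys : List Char) (hlen : xs.length = ys.length) (hne : xs ≠ ys)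
    (hl : (pvMism xs ys).length = 1) :
    pvMism xs ys = [((pvCommon xs ys : Nat) : Int)] := by
  obtain ⟨m, hm⟩ := List.length_eq_one_iff.mp hl
  have hpm := pv_p_mem xs ys hlen hne
  rw [hm] at hpm ⊢
  simp only [List.mem_singleton] at hpm
  rw [hpm]

lemma pv_mism_two (xs ys : List Char) (hlen : xs.length = ys.length) (hne : xs ≠ ys)
    (hk : xs.length - pvCommon xs ys -
        pvCommon (xs.drop (pvCommon xs ys)).reverse (ys.drop (pvCommon xs ys)).reverse = 2) :
    pvMism xs ys = [((pvCommon xs ys : Nat) : Int), ((pvCommon xs ys : Nat) : Int) + 1] := by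
  have hplt := pv_p_lt xs ys hlen hne
  have hslt := pv_s_lt xs ys hlen hne
  have hpm := pv_p_mem xs ys hlen hne
  have hqm := pv_last_mem xs ys hlen hne
  have hbd := pv_bounds xs ys hlen
  set p := pvCommon xs ys with hp
  set s := pvCommon (xs.drop p).reverse (ys.drop p).reverse with hs
  have hq : xs.length - 1 - s = p + 1 := by omega
  rw [hq] at hqm
  have hcast : ((p + 1 : Nat) : Int) = ((p : Nat) : Int) + 1 := by push_cast; ring
  rw [hcast] at hqm
  have hall : ∀ m ∈ pvMism xs ys, ((p : Nat) : Int) ≤ m ∧ m ≤ ((p : Nat) : Int) + 1 := by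
    intro m hm
    have := hbd m hm
    rw [hq, hcast] at this
    exact this
  have hpw := pvMism_pairwise xs ys
  match hmeq : pvMism xs ys with
  | [] => rw [hmeq] at hpm; simp at hpm
  | [m] =>
    rw [hmeq] at hpm hqm
    simp only [List.mem_singleton] at hpm hqm
    omega
  | m1 :: m2 :: tl =>
    rw [hmeq] at hpm hqm hall hpw
    simp only [List.mem_cons] at hpm hqm
    rw [List.pairwise_cons] at hpw
    have h12 := hpw.1 m2 (by simp)
    have hb1 := hall m1 (by simp)
    have hb2 := hall m2 (by simp)
    -- m1 = p
    have hm1 : m1 = ((p : Nat) : Int) := by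
      rcases hpm with h | h | h
      · omega
      · omega
      · have := (List.pairwise_cons.mp hpw.2).1 _ h
        omega
    -- m2 = p + 1
    have hm2 : m2 = ((p : Nat) : Int) + 1 := by
      rcases hqm with h | h | h
      · omega
      · omega
      · have := (List.pairwise_cons.mp hpw.2).1 _ h
        omega
    -- tl = []
    have htl : tl = [] := by
      cases htl : tl with
      | nil => rfl
      | cons m3 tl' =>
        have hb3 := hall m3 (by simp [htl])
        have := (List.pairwise_cons.mp hpw.2).1 m3 (by simp [htl])
        omega
    rw [hm1, hm2, htl]

lemma pv_mism_two_iff (xs ys : List Char) (hlen : xs.length = ys.length) (hne : xs ≠ ys) :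
    ((pvMism xs ys).length = 2 ∧ (pvMism xs ys).getD 0 0 + 1 = (pvMism xs ys).getD 1 0) ↔
      xs.length - pvCommon xs ys -
        pvCommon (xs.drop (pvCommon xs ys)).reverse (ys.drop (pvCommon xs ys)).reverse = 2 := by
  have hplt := pv_p_lt xs ys hlen hne
  have hslt := pv_s_lt xs ys hlen hne
  have hpm := pv_p_mem xs ys hlen hne
  have hqm := pv_last_mem xs ys hlen hne
  have hbd := pv_bounds xs ys hlen
  set p := pvCommon xs ys with hp
  set s := pvCommon (xs.drop p).reverse (ys.drop p).reverse with hs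
  constructor
  · rintro ⟨hl, hadj⟩
    obtain ⟨m1, m2, hm⟩ := List.length_eq_two.mp hl
    have hpw := pvMism_pairwise xs ys
    rw [hm] at hpm hqm hpw hadj
    rw [List.pairwise_cons] at hpw
    have h12 := hpw.1 m2 (by simp)
    simp only [List.getD_cons_zero, List.getD_cons_succ] at hadj
    have hb1 := hbd m1 (by rw [hm]; simp)
    have hb2 := hbd m2 (by rw [hm]; simp)
    simp only [List.mem_cons, List.not_mem_nil, or_false] at hpm hqm
    have hm1 : m1 = ((p : Nat) : Int) := by rcases hpm with h | h <;> omega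
    have hm2 : m2 = ((xs.length - 1 - s : Nat) : Int) := by rcases hqm with h | h <;> omega
    have : ((p : Nat) : Int) + 1 = ((xs.length - 1 - s : Nat) : Int) := by
      rw [← hm1, ← hm2]; exact hadj
    have : p + 1 = xs.length - 1 - s := by exact_mod_cast this
    omega
  · intro hk
    have := pv_mism_two xs ys hlen hne hk
    rw [this]
    simp


lemma pv_insert_iff (xs ys : List Char) (hlen : ys.length = xs.length + 1) :
    (xs.drop (pvCommon xs ys) = ys.drop (pvCommon xs ys + 1)) ↔
      xs.length ≤ pvCommon xs ys +
        pvCommon (xs.drop (pvCommon xs ys)).reverse (ys.drop (pvCommon xs ys)).reverse := by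
  set p := pvCommon xs ys with hp
  have hple : p ≤ xs.length := by have := pvCommon_le xs ys; omega
  have hlr : (xs.drop p).length = xs.length - p := by simp
  have hlt : (ys.drop p).length = xs.length + 1 - p := by simp; omega
  have h := pv_suffix_iff (xs.drop p) (ys.drop p) (by omega)
  rw [hlr, hlt, show xs.length + 1 - p - (xs.length - p) = 1 by omega, List.drop_drop] at h
  rw [← h]
  omega

lemma pv_get_opt (u : List Char) (j : Nat) (hj : j < u.length) :
    PySem.List.pyGet? u ((j : Nat) : Int) = some (u.getD j ' ') := by
  rw [PySem.List.pyGet?_natCast, List.getElem?_eq_getElem hj, List.getD_eq_getElem _ _ hj]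

-- ===== VERDICT (by name: the statement is the Claim_ definition above) =====
theorem distance1_op_spec : Claim_equal_distance1_op := by
  intro a b _
  unfold Spec_distance1_op distance1_op distance1_op_alt
  by_cases hab : a = b
  · simp [hab]
  · have hbeq : (a == b) = false := by simp [hab]
    simp only [hbeq, Bool.false_eq_true, if_false]
    have hne : a.toList ≠ b.toList := fun h => hab (String.toList_inj.mp h)
    set xs := a.toList with hxs
    set ys := b.toList with hys
    by_cases habs : ((xs.length : Int) - (ys.length : Int)).natAbs > 1
    · rw [if_pos habs, if_pos habs]
    · rw [if_neg habs, if_neg habs]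
      by_cases hll : xs.length = ys.length
      · rw [if_pos hll, if_pos hll]
        have hplt := pv_p_lt xs ys hll hne
        have hslt := pv_s_lt xs ys hll hne
        have h1 := pv_mism_one xs ys hll hne
        have h2 := pv_mism_two_iff xs ys hll hne
        by_cases hk1 : xs.length - pvCommon xs ys -
            pvCommon (xs.drop (pvCommon xs ys)).reverse (ys.drop (pvCommon xs ys)).reverse = 1
        · rw [if_pos (h1.mpr hk1), if_pos hk1, pv_mism_one_eq xs ys hll hne (h1.mpr hk1)]
          simp
        · rw [if_neg (fun h => hk1 (h1.mp h)), if_neg hk1]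
          by_cases hk2 : xs.length - pvCommon xs ys -
              pvCommon (xs.drop (pvCommon xs ys)).reverse (ys.drop (pvCommon xs ys)).reverse = 2
          · have hmeq := pv_mism_two xs ys hll hne hk2
            have hp1 : pvCommon xs ys + 1 < xs.length := by omega
            rw [hmeq]
            simp only [List.getD_cons_zero, List.getD_cons_succ, List.length_cons, List.length_nil]
            rw [show ((pvCommon xs ys : Nat) : Int) + 1 = (((pvCommon xs ys + 1 : Nat) : Int)) by
              push_cast; ring]
            rw [pv_get_opt xs (pvCommon xs ys) (by omega),
              pv_get_opt ys (pvCommon xs ys + 1) (by omega),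
              pv_get_opt xs (pvCommon xs ys + 1) hp1,
              pv_get_opt ys (pvCommon xs ys) (by omega)]
            simp only [Option.some.injEq]
            by_cases hc : xs.getD (pvCommon xs ys) ' ' = ys.getD (pvCommon xs ys + 1) ' ' ∧
                xs.getD (pvCommon xs ys + 1) ' ' = ys.getD (pvCommon xs ys) ' '
            · rw [if_pos ⟨trivial, trivial, hc.1, hc.2⟩, if_pos ⟨hk2, hc.1, hc.2⟩]
            · rw [if_neg (fun h => hc ⟨h.2.2.1, h.2.2.2⟩), if_neg (fun h => hc ⟨h.2.1, h.2.2⟩)]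
          · rw [if_neg (fun h => hk2 (h2.mp ⟨h.1, h.2.1⟩)), if_neg (fun h => hk2 h.1)]
      · rw [if_neg hll, if_neg hll]
        by_cases hins : xs.length + 1 = ys.length
        · rw [if_pos hins]
          have hw : pvWhileEq xs ys xs.length (xs.length + 1) 0 = pvCommon xs ys :=
            pvWhileEq_eq_common xs ys xs.length (by omega)
          rw [hw]
          have hiff := pv_insert_iff xs ys (by omega)
          rw [show min xs.length ys.length = xs.length from by omega]
          by_cases hcond : xs.drop (pvCommon xs ys) = ys.drop (pvCommon xs ys + 1)
          · rw [if_pos hcond, if_pos (hiff.mp hcond), if_pos hins.symm]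
          · rw [if_neg hcond, if_neg (fun h => hcond (hiff.mpr h))]
        · rw [if_neg hins]
          by_cases hdel : xs.length = ys.length + 1
          · rw [if_pos hdel]
            have hw : pvWhileEq xs ys ys.length (ys.length + 1) 0 = pvCommon xs ys :=
              pvWhileEq_eq_common xs ys ys.length (by omega)
            rw [hw]
            have hiff := pv_insert_iff ys xs (by omega)
            rw [pvCommon_comm ys xs] at hiff
            rw [pvCommon_comm ((ys.drop (pvCommon xs ys)).reverse)] at hiff
            rw [show min xs.length ys.length = ys.length from by omega]
            by_cases hcond : xs.drop (pvCommon xs ys + 1) = ys.drop (pvCommon xs ys)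
            · rw [if_pos hcond, if_pos (hiff.mp hcond.symm), if_neg (show ¬ ys.length = xs.length + 1 by omega)]
            · rw [if_neg hcond, if_neg (fun h => hcond (hiff.mpr h).symm)]
          · rw [if_neg hdel]
            exfalso
            omega
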